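-- pv_equiv track=rewrite | github.com/pypi-data/pypi-mirror-227 | packages/goodie/goodie-0.0.2.tar.gz/goodie-0.0.2/goodie/utils.py | merge_segment
-- ===== SOURCE A (Python) =====
-- import collections
--
-- def merge_segment(texts, max_len=512, stride=0):
--     ret = []
--     cur = collections.deque()
--     cur_len = 0
--     for text in texts:
--         cur.append(text)
--         cur_len += len(text)
--         if cur_len >= max_len:
--             ret.append(''.join(cur))
--             while cur_len > stride:
--                 cur_len -= len(cur.popleft())
--     if cur:
--         if ''.join(cur) not in ret:
--             ret.append(''.join(cur))
--     return ret
-- ===== SOURCE B (Python) =====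
-- def merge_segment(texts, max_len=512, stride=0):
--     lens = [len(t) for t in texts]
--     ranges = []
--     start = 0
--     run = 0
--     for i, n in enumerate(lens):
--         run += n
--         if run >= max_len:
--             ranges.append((start, i))
--             while run > stride and start <= i:
--                 run -= lens[start]
--                 start += 1
--     ret = [''.join(texts[s:e + 1]) for s, e in ranges]
--     if start < len(texts):
--         tail = ''.join(texts[start:])
--         if tail not in ret:
--             ret.append(tail)
--     return ret
-- ===== Notes on version B (the rewrite author's own statement) =====
-- stated objective: alternative
-- what changed: Replaces A's deque-of-strings single pass (append/popleft and joining the live deque) by a two-pass index scheme: a first pass over precomputed lengths records (start,end) index ranges and shrinks the window by advancing a start index, a second pass joins list slices into the chunk strings. Where A raises IndexError (negative stride with total length reaching max_len), Pre_ excludes the input.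
import Mathlib
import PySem

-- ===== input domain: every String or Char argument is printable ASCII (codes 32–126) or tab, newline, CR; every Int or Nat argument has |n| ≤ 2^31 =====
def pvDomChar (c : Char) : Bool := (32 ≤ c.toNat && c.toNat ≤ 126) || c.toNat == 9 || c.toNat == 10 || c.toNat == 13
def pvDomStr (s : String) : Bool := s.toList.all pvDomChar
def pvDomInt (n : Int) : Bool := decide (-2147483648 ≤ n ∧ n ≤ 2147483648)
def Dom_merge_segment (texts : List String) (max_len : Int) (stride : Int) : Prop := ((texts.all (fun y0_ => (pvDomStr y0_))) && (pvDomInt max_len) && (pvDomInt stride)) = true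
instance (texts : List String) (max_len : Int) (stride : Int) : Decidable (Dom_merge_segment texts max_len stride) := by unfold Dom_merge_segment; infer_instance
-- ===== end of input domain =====

-- B replaces A's deque of strings by a two-pass index scheme (record (start,end) ranges over
-- precomputed lengths, join slices afterwards); objective: alternative decomposition, same cost.
-- ===== PORT A =====
-- inner 'while cur_len > stride: cur_len -= len(cur.popleft())'; on empty deque with
-- cur_len > stride Python raises IndexError (excluded by Pre_), here it just returns.
def msShrinkA (stride : Int) : List String → Int → List String × Int
  | [], cl => ([], cl)
  | t :: rest, cl =>
    if stride < cl then msShrinkA stride rest (cl - PySem.Str.len t)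
    else (t :: rest, cl)

def msStepA (max_len stride : Int) (st : List String × List String × Int) (text : String) :
    List String × List String × Int :=
  let cur := st.2.1 ++ [text]
  let cl := st.2.2 + PySem.Str.len text
  if max_len ≤ cl then
    let p := msShrinkA stride cur cl
    (st.1 ++ [PySem.Str.join "" cur], p.1, p.2)
  else (st.1, cur, cl)

def merge_segment (texts : List String) (max_len : Int) (stride : Int) : List String :=
  let st := texts.foldl (msStepA max_len stride) ([], [], 0)
  if st.2.1 ≠ [] then
    let j := PySem.Str.join "" st.2.1
    if j ∈ st.1 then st.1 else st.1 ++ [j]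
  else st.1

-- ===== PORT B =====
-- 'while run > stride and start <= i: run -= lens[start]; start += 1'
-- (lens[start] is always in range when read: start ≤ i < len(lens))
-- the loop runs at most (i + 1 - start) times; that bound is the structural fuel
-- (fuel 0 forces start > i, where the guard is false anyway, so the fuel is exact)
def msShrinkB (lens : List Int) (stride i : Int) : Nat → Int → Int → Int × Int
  | 0, start, run => (start, run)
  | fuel + 1, start, run =>
    if stride < run ∧ start ≤ i then
      msShrinkB lens stride i fuel (start + 1) (run - PySem.List.pyGetD lens start 0)
    else (start, run)

def msStepB (lens : List Int) (max_len stride : Int) (st : List (Int × Int) × Int × Int)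
    (p : Int × Int) : List (Int × Int) × Int × Int :=
  let run := st.2.2 + p.2
  if max_len ≤ run then
    let q := msShrinkB lens stride p.1 (p.1 + 1 - st.2.1).toNat st.2.1 run
    (st.1 ++ [(st.2.1, p.1)], q.1, q.2)
  else (st.1, st.2.1, run)

def merge_segment_alt (texts : List String) (max_len : Int) (stride : Int) : List String :=
  let lens := texts.map PySem.Str.len
  let st := (PySem.List.enumerate lens 0).foldl (msStepB lens max_len stride) ([], 0, 0)
  let ret := st.1.map (fun r => PySem.Str.join "" (PySem.List.slice texts (some r.1) (some (r.2 + 1))))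
  if st.2.1 < (texts.length : Int) then
    let tail := PySem.Str.join "" (PySem.List.slice texts (some st.2.1) none)
    if tail ∈ ret then ret else ret ++ [tail]
  else ret

-- ===== PRECONDITION & SPEC =====
def msSumL (l : List String) : Int := (l.map PySem.Str.len).sum

-- Pre_ excludes exactly the inputs where A raises IndexError: a negative stride together with a
-- nonempty texts whose total length reaches max_len (the shrink loop then pops an empty deque).
def Pre_merge_segment (texts : List String) (max_len : Int) (stride : Int) : Prop :=
  0 ≤ stride ∨ texts = [] ∨ msSumL texts < max_len

instance (texts : List String) (max_len : Int) (stride : Int) :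
    Decidable (Pre_merge_segment texts max_len stride) := by
  unfold Pre_merge_segment; infer_instance

def pvWitness_merge_segment : List String × Int × Int := (["ab", "c"], 2, 0)

def Spec_merge_segment (texts : List String) (max_len : Int) (stride : Int) (out : List String) : Prop := out = merge_segment_alt texts max_len stride
instance (texts : List String) (max_len : Int) (stride : Int) (out : List String) : Decidable (Spec_merge_segment texts max_len stride out) := by unfold Spec_merge_segment; infer_instance

-- ===== CLAIM (what is proved, stated in full; the proofs are below) =====
def Claim_equal_merge_segment : Prop := ∀ (texts : List String) (max_len : Int) (stride : Int), Dom_merge_segment texts max_len stride → Pre_merge_segment texts max_len stride → Spec_merge_segment texts max_len stride (merge_segment texts max_len stride)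

-- ===== LEMMAS AND PROOFS =====

theorem msSumL_nil : msSumL [] = 0 := rfl

theorem msSumL_cons (t : String) (l : List String) :
    msSumL (t :: l) = PySem.Str.len t + msSumL l := by simp [msSumL]

theorem msSumL_append (l1 l2 : List String) : msSumL (l1 ++ l2) = msSumL l1 + msSumL l2 := by
  simp [msSumL]

-- the deque after processing i texts and popping s of them: texts[s:i]
def msWin (texts : List String) (s i : Nat) : List String := (texts.take i).drop s

-- the chunk string a recorded range denotes
def msRJ (texts : List String) (r : Nat × Nat) : String :=
  PySem.Str.join "" (PySem.List.slice texts (some (r.1 : Int)) (some ((r.2 : Int) + 1)))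

def msC (r : Nat × Nat) : Int × Int := ((r.1 : Int), (r.2 : Int))

theorem msWin_nil (texts : List String) (s i : Nat) (h : i ≤ s) : msWin texts s i = [] := by
  unfold msWin
  apply List.drop_eq_nil_of_le
  simp [List.length_take]; omega

theorem msWin_length (texts : List String) (s : Nat) :
    msWin texts s texts.length = texts.drop s := by
  unfold msWin; rw [List.take_length]

theorem msWin_cons (texts : List String) (s i : Nat) (hs : s < i) (hi : i ≤ texts.length) :
    msWin texts s i = texts[s]'(by omega) :: msWin texts (s+1) i := by
  unfold msWin
  have hlen : (texts.take i).length = i := by simp [List.length_take]; omega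
  rw [List.drop_eq_getElem_cons (by omega : s < (texts.take i).length)]
  congr 1
  simp

theorem msWin_succ (texts : List String) (s i : Nat) (hs : s ≤ i) (hi : i < texts.length) :
    msWin texts s (i+1) = msWin texts s i ++ [texts[i]] := by
  unfold msWin
  rw [show texts.take (i+1) = texts.take i ++ [texts[i]] from by
    rw [List.take_add_one]; simp [List.getElem?_eq_getElem hi]]
  rw [List.drop_append_of_le_length (by simp [List.length_take]; omega)]

theorem msWin_eq_drop_take (texts : List String) (s i : Nat) :
    msWin texts s i = (texts.drop s).take (i - s) := List.drop_take ..

theorem msRJ_eq (texts : List String) (s i : Nat) :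
    msRJ texts (s, i) = PySem.Str.join "" (msWin texts s (i+1)) := by
  unfold msRJ
  rw [show ((i : Int) + 1) = ((i + 1 : Nat) : Int) from by push_cast; ring]
  rw [PySem.List.slice_natCast]
  rw [msWin_eq_drop_take]

theorem ms_shrink_sim (texts : List String) (stride : Int) (i : Nat)
    (hi : i < texts.length) :
    ∀ (fuel s : Nat), fuel = i + 1 - s → s ≤ i + 1 →
    ∃ s' : Nat, s ≤ s' ∧ s' ≤ i + 1 ∧
      msShrinkB (texts.map PySem.Str.len) stride (i : Int) fuel (s : Int)
        (msSumL (msWin texts s (i+1))) = ((s' : Int), msSumL (msWin texts s' (i+1))) ∧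
      msShrinkA stride (msWin texts s (i+1)) (msSumL (msWin texts s (i+1)))
        = (msWin texts s' (i+1), msSumL (msWin texts s' (i+1))) := by
  intro fuel
  induction fuel with
  | zero =>
    intro s hf hs
    have hsi : s = i + 1 := by omega
    subst hsi
    refine ⟨i + 1, le_refl _, le_refl _, rfl, ?_⟩
    rw [msWin_nil texts (i+1) (i+1) (le_refl _)]
    rfl
  | succ fuel ih =>
    intro s hf hs
    have hsle : s ≤ i := by omega
    by_cases hg : stride < msSumL (msWin texts s (i+1))
    · obtain ⟨s', h1, h2, hB, hA⟩ := ih (s+1) (by omega) (by omega)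
      refine ⟨s', by omega, h2, ?_, ?_⟩
      · have hget : PySem.List.pyGetD (texts.map PySem.Str.len) (s : Int) 0
            = PySem.Str.len (texts[s]'(by omega)) := by
          rw [PySem.List.pyGetD_natCast]
          rw [List.getD_eq_getElem _ _ (by simp; omega)]
          simp
        simp only [msShrinkB, if_pos (⟨hg, by exact_mod_cast hsle⟩ :
          stride < msSumL (msWin texts s (i+1)) ∧ (s : Int) ≤ (i : Int))]
        rw [hget]
        have hrw : msSumL (msWin texts s (i+1)) - PySem.Str.len (texts[s]'(by omega))
            = msSumL (msWin texts (s+1) (i+1)) := by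
          rw [msWin_cons texts s (i+1) (by omega) (by omega), msSumL_cons]; ring
        rw [hrw, show ((s : Int) + 1) = ((s + 1 : Nat) : Int) from by push_cast; ring]
        exact hB
      · have hg' := hg
        rw [msWin_cons texts s (i+1) (by omega) (by omega)] at hg' ⊢
        simp only [msShrinkA]
        rw [if_pos hg']
        rw [msSumL_cons]
        have harith : PySem.Str.len (texts[s]'(by omega)) + msSumL (msWin texts (s+1) (i+1))
            - PySem.Str.len (texts[s]'(by omega)) = msSumL (msWin texts (s+1) (i+1)) := by ring
        rw [harith]
        exact hA
    · refine ⟨s, le_refl _, by omega, ?_, ?_⟩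
      · simp only [msShrinkB]
        rw [if_neg (by intro hc; exact hg hc.1)]
      · rw [msWin_cons texts s (i+1) (by omega) (by omega)]
        simp only [msShrinkA]
        rw [if_neg (by rw [msWin_cons texts s (i+1) (by omega) (by omega)] at hg; exact hg)]

theorem ms_loop_sim (texts : List String) (max_len stride : Int) :
    ∀ (rest : List String) (i : Nat), rest = texts.drop i → i ≤ texts.length →
    ∀ (ranges : List (Nat × Nat)) (s : Nat), s ≤ i →
    ∃ (ranges' : List (Nat × Nat)) (s' : Nat), s' ≤ texts.length ∧
      (PySem.List.enumerate (rest.map PySem.Str.len) (i : Int)).foldl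
          (msStepB (texts.map PySem.Str.len) max_len stride)
          (ranges.map msC, (s : Int), msSumL (msWin texts s i))
        = (ranges'.map msC, (s' : Int), msSumL (msWin texts s' texts.length)) ∧
      rest.foldl (msStepA max_len stride)
          (ranges.map (msRJ texts), msWin texts s i, msSumL (msWin texts s i))
        = (ranges'.map (msRJ texts), msWin texts s' texts.length,
           msSumL (msWin texts s' texts.length)) := by
  intro rest
  induction rest with
  | nil =>
    intro i hdrop hi ranges s hs
    have hlen : i = texts.length := by
      have := congrArg List.length hdrop
      simp [List.length_drop] at this
      omega
    refine ⟨ranges, s, by omega, ?_, ?_⟩ <;> rw [hlen] <;> rfl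
  | cons t rest ih =>
    intro i hdrop hi ranges s hs
    have hi' : i < texts.length := by
      by_contra h
      rw [List.drop_eq_nil_of_le (by omega)] at hdrop
      exact List.cons_ne_nil t rest hdrop
    have hsplit := List.drop_eq_getElem_cons hi'
    rw [← hdrop] at hsplit
    have ht : texts[i] = t := (List.cons.injEq _ _ _ _ ▸ hsplit).1.symm
    have hrest : rest = texts.drop (i+1) := (List.cons.injEq _ _ _ _ ▸ hsplit).2
    have hrun : msSumL (msWin texts s i) + PySem.Str.len t = msSumL (msWin texts s (i+1)) := by
      rw [msWin_succ texts s i hs hi', msSumL_append, ht, msSumL_cons, msSumL_nil]; ring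
    have hwin : msWin texts s i ++ [t] = msWin texts s (i+1) := by
      rw [msWin_succ texts s i hs hi', ht]
    rw [List.map_cons, PySem.List.enumerate_cons, List.foldl_cons, List.foldl_cons]
    by_cases hc : max_len ≤ msSumL (msWin texts s (i+1))
    · -- the chunk closes at index i: both record it, then shrink in lockstep
      obtain ⟨s'', hs1, hs2, hB, hA⟩ := ms_shrink_sim texts stride i hi' (i + 1 - s) s (rfl) (by omega)
      obtain ⟨ranges', s', h1, h2, h3⟩ :=
        ih (i+1) hrest (by omega) (ranges ++ [(s, i)]) s'' (by omega)
      refine ⟨ranges', s', h1, ?_, ?_⟩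
      · rw [show msStepB (texts.map PySem.Str.len) max_len stride
              (ranges.map msC, (s : Int), msSumL (msWin texts s i)) ((i : Int), PySem.Str.len t)
            = ((ranges ++ [(s, i)]).map msC, (s'' : Int), msSumL (msWin texts s'' (i+1))) from ?_]
        · rw [show (i : Int) + 1 = ((i + 1 : Nat) : Int) from by push_cast; ring]
          exact h2
        · simp only [msStepB]
          rw [hrun, if_pos hc]
          rw [show ((i : Int) + 1 - (s : Int)).toNat = i + 1 - s from by omega]
          rw [hB]
          simp [msC]
      · rw [show msStepA max_len stride
              (ranges.map (msRJ texts), msWin texts s i, msSumL (msWin texts s i)) t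
            = ((ranges ++ [(s, i)]).map (msRJ texts), msWin texts s'' (i+1),
               msSumL (msWin texts s'' (i+1))) from ?_]
        · exact h3
        · simp only [msStepA]
          rw [hrun, hwin, if_pos hc, hA]
          simp [msRJ_eq texts s i]
    · -- no chunk closes: both just extend the window
      obtain ⟨ranges', s', h1, h2, h3⟩ := ih (i+1) hrest (by omega) ranges s (by omega)
      refine ⟨ranges', s', h1, ?_, ?_⟩
      · rw [show msStepB (texts.map PySem.Str.len) max_len stride
              (ranges.map msC, (s : Int), msSumL (msWin texts s i)) ((i : Int), PySem.Str.len t)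
            = (ranges.map msC, (s : Int), msSumL (msWin texts s (i+1))) from ?_]
        · rw [show (i : Int) + 1 = ((i + 1 : Nat) : Int) from by push_cast; ring]
          exact h2
        · simp only [msStepB]
          rw [hrun, if_neg hc]
      · rw [show msStepA max_len stride
              (ranges.map (msRJ texts), msWin texts s i, msSumL (msWin texts s i)) t
            = (ranges.map (msRJ texts), msWin texts s (i+1), msSumL (msWin texts s (i+1))) from ?_]
        · exact h3
        · simp only [msStepA]
          rw [hrun, hwin, if_neg hc]

-- ===== VERDICT (by name: the statement is the Claim_ definition above) =====
theorem ms_final (texts : List String) (max_len stride : Int) :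
    merge_segment texts max_len stride = merge_segment_alt texts max_len stride := by
  obtain ⟨ranges', s', h1, h2, h3⟩ :=
    ms_loop_sim texts max_len stride texts 0 (List.drop_zero (l := texts)).symm (by omega) [] 0 (le_refl 0)
  have hA : texts.foldl (msStepA max_len stride) ([], [], 0)
      = (ranges'.map (msRJ texts), msWin texts s' texts.length,
         msSumL (msWin texts s' texts.length)) := h3
  have hB : (PySem.List.enumerate (texts.map PySem.Str.len) 0).foldl
        (msStepB (texts.map PySem.Str.len) max_len stride) ([], 0, 0)
      = (ranges'.map msC, ((s' : Nat) : Int), msSumL (msWin texts s' texts.length)) := h2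
  simp only [merge_segment, merge_segment_alt]
  rw [hA, hB, msWin_length]
  have hret : (ranges'.map msC).map
        (fun r => PySem.Str.join "" (PySem.List.slice texts (some r.1) (some (r.2 + 1))))
      = ranges'.map (msRJ texts) := by
    rw [List.map_map]; rfl
  rw [hret]
  by_cases hc : s' < texts.length
  · rw [if_pos (show texts.drop s' ≠ [] from by rw [Ne, List.drop_eq_nil_iff]; omega),
        if_pos (show ((s' : Nat) : Int) < (texts.length : Int) from by exact_mod_cast hc),
        PySem.List.slice_from_natCast]
  · rw [if_neg (show ¬ texts.drop s' ≠ [] from by rw [Ne, List.drop_eq_nil_iff]; omega),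
        if_neg (show ¬ ((s' : Nat) : Int) < (texts.length : Int) from by omega)]

theorem merge_segment_spec : Claim_equal_merge_segment := by
  intro texts max_len stride _ _
  exact ms_final texts max_len stride
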